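-- pv_equiv track=rewrite | github.com/maykon1313/Faculdade | 2º Semester/Progamação/OBI Fase 2 - 2024/4 - poder.py | dfs
-- ===== SOURCE A (Python) =====
-- def dfs(heroi, matriz, visto, soma, i, j):
--     visto[i][j] = True
--     soma += heroi
--
--     if i > 0:
--         if matriz[i-1][j] <= soma and visto[i-1][j] == False:
--                 soma = dfs(matriz[i-1][j], matriz, visto, soma, i-1, j)
--
--
--     if i < len(matriz)-1:
--         if matriz[i+1][j] <= soma and visto[i+1][j] == False:
--                 soma = dfs(matriz[i+1][j], matriz, visto, soma, i+1, j)
--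
--
--     if j < len(matriz[0])-1:
--         if matriz[i][j+1] <= soma and visto[i][j+1] == False:
--             soma = dfs(matriz[i][j+1], matriz, visto, soma, i, j+1)
--
--
--     if j > 0:
--         if matriz[i][j-1] <= soma and visto[i][j-1] == False:
--             soma = dfs(matriz[i][j-1], matriz, visto, soma, i, j-1)
--
--     return soma
-- ===== SOURCE B (Python) =====
-- # Iterative re-implementation: explicit stack of resumable (cell, next-direction) frames
-- # replaces the recursion; one shared running total. Mutates visto like the original
-- # (the same cells end up True); the equivalence claimed is about the return value.
-- def dfs(heroi, matriz, visto, soma, i, j):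
--     rows = len(matriz)
--     cols = len(matriz[0])
--     visto[i][j] = True
--     soma += heroi
--     stack = [(i, j, 0)]
--     while stack:
--         ci, cj, k = stack.pop()
--         if k >= 4:
--             continue
--         if k == 0:
--             ok, ni, nj = ci > 0, ci - 1, cj
--         elif k == 1:
--             ok, ni, nj = ci < rows - 1, ci + 1, cj
--         elif k == 2:
--             ok, ni, nj = cj < cols - 1, ci, cj + 1
--         else:
--             ok, ni, nj = cj > 0, ci, cj - 1
--         stack.append((ci, cj, k + 1))
--         if ok and matriz[ni][nj] <= soma and visto[ni][nj] == False:
--             visto[ni][nj] = True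
--             soma += matriz[ni][nj]
--             stack.append((ni, nj, 0))
--     return soma
-- ===== Notes on version B (the rewrite author's own statement) =====
-- stated objective: alternative
-- what changed: The recursion is replaced by an explicit stack of resumable (cell, next-direction) frames driving one shared running total, so the traversal is iterative (no Python call stack / recursion limit) while conquering cells in exactly the same order.
-- outside the precondition, e.g. on dfs(5, [[5], [1, 2]], [[False], [False, False]], 0, 0, 0): A returns 6, B returns 6
import Mathlib
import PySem

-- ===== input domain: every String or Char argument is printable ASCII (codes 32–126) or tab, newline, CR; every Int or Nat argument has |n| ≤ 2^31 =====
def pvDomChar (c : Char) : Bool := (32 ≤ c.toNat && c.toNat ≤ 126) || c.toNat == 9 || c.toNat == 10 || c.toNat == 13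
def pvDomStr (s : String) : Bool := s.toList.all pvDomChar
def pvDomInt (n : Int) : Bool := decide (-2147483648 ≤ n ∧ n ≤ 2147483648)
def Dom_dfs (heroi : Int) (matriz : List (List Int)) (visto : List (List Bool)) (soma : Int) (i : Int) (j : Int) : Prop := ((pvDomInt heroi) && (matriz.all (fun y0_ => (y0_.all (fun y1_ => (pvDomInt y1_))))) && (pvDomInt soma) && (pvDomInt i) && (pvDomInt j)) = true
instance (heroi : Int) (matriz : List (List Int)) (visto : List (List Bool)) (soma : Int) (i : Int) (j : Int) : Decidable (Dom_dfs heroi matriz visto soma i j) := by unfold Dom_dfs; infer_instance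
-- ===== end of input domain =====

-- ===== PORT A =====
-- B changes the recursion into an explicit stack of resumable frames (same traversal, no call stack).
-- Shared helpers: 2-D read/write with Python index semantics, and the grid dimensions.
def pvGet2 {a : Type} (m : List (List a)) (i j : Int) : Option a :=
  (PySem.List.pyGet? m i).bind (fun row => PySem.List.pyGet? row j)

-- visto[i][j] = True  (no-op where Python would raise IndexError; those inputs are outside Pre_)
def pvSet2 (v : List (List Bool)) (i j : Int) : List (List Bool) :=
  PySem.List.pySetD v i (PySem.List.pySetD (PySem.List.pyGetD v i []) j true)

-- matriz[i][j]  (default 0 where Python would raise; those inputs are outside Pre_)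
def pvMval (m : List (List Int)) (i j : Int) : Int := (pvGet2 m i j).getD 0

def pvRows (m : List (List Int)) : Int := (m.length : Int)

def pvCols (m : List (List Int)) : Int := ((((PySem.List.pyGet? m 0).getD []).length : Nat) : Int)

-- number of False cells: the termination measure of the traversal
def pvCF (v : List (List Bool)) : Nat := v.flatten.count false


theorem pvCntSetTrue_lt (row : List Bool) (k : Nat) (h : row[k]? = some false) :
    (row.set k true).count false < row.count false := by
  induction row generalizing k with
  | nil => simp at h
  | cons x xs ih =>
    cases k with
    | zero => simp_all [List.count_cons]
    | succ k =>
      have := ih k (by simpa using h)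
      simp [List.count_cons]; omega

theorem pvCF_set_exchange (v : List (List Bool)) (k : Nat) (row r' : List Bool) (hk : v[k]? = some row) :
    pvCF (v.set k r') + row.count false = pvCF v + r'.count false := by
  induction v generalizing k with
  | nil => simp at hk
  | cons x xs ih =>
    cases k with
    | zero =>
      simp only [List.getElem?_cons_zero, Option.some.injEq] at hk
      subst hk
      simp [pvCF, List.count_append]
      omega
    | succ k =>
      have := ih k (by simpa using hk)
      simp only [List.set_cons_succ, pvCF, List.flatten_cons, List.count_append] at this ⊢
      omega

theorem pvCF_pvSet2_lt (v : List (List Bool)) (i j : Int) (h : pvGet2 v i j = some false) :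
    pvCF (pvSet2 v i j) < pvCF v := by
  unfold pvGet2 at h
  rcases hgi : PySem.List.pyGet? v i with _ | row
  · simp [hgi] at h
  · rw [hgi] at h
    simp only [Option.bind_some] at h
    have hki' : ∃ ki, PySem.List.pyIdx? v.length i = some ki ∧ v[ki]? = some row := by
      simpa [PySem.List.pyGet?, Option.bind_eq_some_iff] using hgi
    obtain ⟨ki, hki, hrow⟩ := hki'
    have hkj' : ∃ kj, PySem.List.pyIdx? row.length j = some kj ∧ row[kj]? = some false := by
      simpa [PySem.List.pyGet?, Option.bind_eq_some_iff] using h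
    obtain ⟨kj, hkj, hfalse⟩ := hkj'
    unfold pvSet2
    have hget : PySem.List.pyGetD v i [] = row := by
      simp [PySem.List.pyGetD, hgi]
    rw [hget]
    set r' := PySem.List.pySetD row j true with hr'
    have hcnt : r'.count false < row.count false := by
      rw [hr']
      simp only [PySem.List.pySetD, PySem.List.pySet?, hkj, Option.map_some, Option.getD_some]
      exact pvCntSetTrue_lt row kj hfalse
    have hx := pvCF_set_exchange v ki row r' hrow
    have houter : PySem.List.pySetD v i r' = v.set ki r' := by
      simp [PySem.List.pySetD, PySem.List.pySet?, hki]
    rw [houter]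
    omega

-- recursive worker of port A: threads the (visto, soma) state that Python keeps by mutation.
-- fuel only guards termination; dfs passes fuel > the termination measure, so it is never exhausted
def dfsA (m : List (List Int)) (fuel : Nat) (heroi : Int) (v : List (List Bool)) (s : Int) (i j : Int) :
    List (List Bool) × Int :=
  match fuel with
  | 0 => (v, s)
  | fuel + 1 =>
    let v1 := pvSet2 v i j
    let s1 := s + heroi
    let p1 :=
      if 0 < i ∧ pvMval m (i-1) j <= s1 ∧ pvGet2 v1 (i-1) j = some false then
        dfsA m fuel (pvMval m (i-1) j) v1 s1 (i-1) j
      else (v1, s1)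
    let p2 :=
      if i < pvRows m - 1 ∧ pvMval m (i+1) j <= p1.2 ∧ pvGet2 p1.1 (i+1) j = some false then
        dfsA m fuel (pvMval m (i+1) j) p1.1 p1.2 (i+1) j
      else p1
    let p3 :=
      if j < pvCols m - 1 ∧ pvMval m i (j+1) <= p2.2 ∧ pvGet2 p2.1 i (j+1) = some false then
        dfsA m fuel (pvMval m i (j+1)) p2.1 p2.2 i (j+1)
      else p2
    let p4 :=
      if 0 < j ∧ pvMval m i (j-1) <= p3.2 ∧ pvGet2 p3.1 i (j-1) = some false then
        dfsA m fuel (pvMval m i (j-1)) p3.1 p3.2 i (j-1)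
      else p3
    p4

def dfs (heroi : Int) (matriz : List (List Int)) (visto : List (List Bool)) (soma : Int) (i : Int) (j : Int) : Int :=
  (dfsA matriz (2 * pvCF visto + 2) heroi visto soma i j).2

-- ===== PORT B =====
-- the stack machine of Source B: frames are (cell i, cell j, next direction index 0..4)
def runB (m : List (List Int)) (rows cols : Int) (stack : List (Int × Int × Nat))
    (v : List (List Bool)) (s : Int) : List (List Bool) × Int :=
  match stack with
  | [] => (v, s)
  | (ci, cj, k) :: rest =>
    match k with
    | 0 =>
      if h : 0 < ci ∧ pvMval m (ci-1) cj <= s ∧ pvGet2 v (ci-1) cj = some false then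
        runB m rows cols ((ci-1, cj, 0) :: (ci, cj, 1) :: rest) (pvSet2 v (ci-1) cj) (s + pvMval m (ci-1) cj)
      else runB m rows cols ((ci, cj, 1) :: rest) v s
    | 1 =>
      if h : ci < rows - 1 ∧ pvMval m (ci+1) cj <= s ∧ pvGet2 v (ci+1) cj = some false then
        runB m rows cols ((ci+1, cj, 0) :: (ci, cj, 2) :: rest) (pvSet2 v (ci+1) cj) (s + pvMval m (ci+1) cj)
      else runB m rows cols ((ci, cj, 2) :: rest) v s
    | 2 =>
      if h : cj < cols - 1 ∧ pvMval m ci (cj+1) <= s ∧ pvGet2 v ci (cj+1) = some false then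
        runB m rows cols ((ci, cj+1, 0) :: (ci, cj, 3) :: rest) (pvSet2 v ci (cj+1)) (s + pvMval m ci (cj+1))
      else runB m rows cols ((ci, cj, 3) :: rest) v s
    | 3 =>
      if h : 0 < cj ∧ pvMval m ci (cj-1) <= s ∧ pvGet2 v ci (cj-1) = some false then
        runB m rows cols ((ci, cj-1, 0) :: (ci, cj, 4) :: rest) (pvSet2 v ci (cj-1)) (s + pvMval m ci (cj-1))
      else runB m rows cols ((ci, cj, 4) :: rest) v s
    | _ + 4 => runB m rows cols rest v s
termination_by (pvCF v, (stack.map (fun f => 5 - min f.2.2 4)).sum)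
decreasing_by
  all_goals first
    | (exact Prod.Lex.left _ _ (pvCF_pvSet2_lt _ _ _ (by exact h.2.2)))
    | (apply Prod.Lex.right; simp; try omega)

def dfs_alt (heroi : Int) (matriz : List (List Int)) (visto : List (List Bool)) (soma : Int) (i : Int) (j : Int) : Int :=
  let rows := pvRows matriz
  let cols := pvCols matriz
  (runB matriz rows cols [(i, j, 0)] (pvSet2 visto i j) (soma + heroi)).2

-- ===== PRECONDITION & SPEC =====
-- Pre_ = rectangular matriz, visto of the same shape, start indices valid Python indices
-- (possibly negative: Python wraps them, and both programs wrap identically).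
-- On ragged or shape-mismatched grids A may still happen to return before reaching a
-- missing cell, but such shapes are malformed input; everywhere else excluded A raises
-- (IndexError on an out-of-range cell, or on len(matriz[0]) for empty matriz).
def Pre_dfs (heroi : Int) (matriz : List (List Int)) (visto : List (List Bool)) (soma : Int) (i : Int) (j : Int) : Prop :=
  matriz ≠ [] ∧
  (∀ row ∈ matriz, row.length = (matriz.headD []).length) ∧
  visto.length = matriz.length ∧
  (∀ row ∈ visto, row.length = (matriz.headD []).length) ∧
  -(matriz.length : Int) <= i ∧ i < (matriz.length : Int) ∧
  -((matriz.headD []).length : Int) <= j ∧ j < ((matriz.headD []).length : Int)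

instance (heroi : Int) (matriz : List (List Int)) (visto : List (List Bool)) (soma : Int) (i : Int) (j : Int) : Decidable (Pre_dfs heroi matriz visto soma i j) := by unfold Pre_dfs; infer_instance

def pvWitness_dfs : Int × List (List Int) × List (List Bool) × Int × Int × Int :=
  (2, [[1, 3], [2, 1]], [[false, false], [false, false]], 0, 0, 0)

def Spec_dfs (heroi : Int) (matriz : List (List Int)) (visto : List (List Bool)) (soma : Int) (i : Int) (j : Int) (out : Int) : Prop := out = dfs_alt heroi matriz visto soma i j
instance (heroi : Int) (matriz : List (List Int)) (visto : List (List Bool)) (soma : Int) (i : Int) (j : Int) (out : Int) : Decidable (Spec_dfs heroi matriz visto soma i j out) := by unfold Spec_dfs; infer_instance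

-- ===== CLAIM (what is proved, stated in full; the proofs are below) =====
def Claim_equal_dfs : Prop := ∀ (heroi : Int) (matriz : List (List Int)) (visto : List (List Bool)) (soma : Int) (i : Int) (j : Int), Dom_dfs heroi matriz visto soma i j → Pre_dfs heroi matriz visto soma i j → Spec_dfs heroi matriz visto soma i j (dfs heroi matriz visto soma i j)

-- ===== LEMMAS AND PROOFS =====

theorem pvCntSetTrue_le (row : List Bool) (k : Nat) : (row.set k true).count false <= row.count false := by
  induction row generalizing k with
  | nil => simp
  | cons x xs ih =>
    cases k with
    | zero => cases x <;> simp [List.count_cons]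
    | succ k => simpa [List.count_cons] using ih k

theorem pvCF_pvSet2_le (v : List (List Bool)) (i j : Int) : pvCF (pvSet2 v i j) <= pvCF v := by
  unfold pvSet2
  rcases hki : PySem.List.pyIdx? v.length i with _ | ki
  · simp [PySem.List.pySetD, PySem.List.pySet?, hki]
  · rcases hrow : v[ki]? with _ | row
    · have hlen : v.length <= ki := by
        by_contra hc
        push_neg at hc
        simp [List.getElem?_eq_getElem hc] at hrow
      simp [PySem.List.pySetD, PySem.List.pySet?, hki, List.set_eq_of_length_le hlen]
    · have hget : PySem.List.pyGetD v i [] = row := by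
        simp [PySem.List.pyGetD, PySem.List.pyGet?, hki, hrow]
      rw [hget]
      set r' := PySem.List.pySetD row j true with hr'
      have hcnt : r'.count false <= row.count false := by
        rw [hr']
        rcases hkj : PySem.List.pyIdx? row.length j with _ | kj
        · simp [PySem.List.pySetD, PySem.List.pySet?, hkj]
        · simp only [PySem.List.pySetD, PySem.List.pySet?, hkj, Option.map_some, Option.getD_some]
          exact pvCntSetTrue_le row kj
      have hx := pvCF_set_exchange v ki row r' hrow
      have houter : PySem.List.pySetD v i r' = v.set ki r' := by
        simp [PySem.List.pySetD, PySem.List.pySet?, hki]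
      rw [houter]
      omega

theorem runB_nil (m : List (List Int)) (rows cols : Int) (v : List (List Bool)) (s : Int) :
    runB m rows cols [] v s = (v, s) := by
  rw [runB]

theorem runB_pop (m : List (List Int)) (rows cols : Int) (ci cj : Int) (k : Nat)
    (rest : List (Int × Int × Nat)) (v : List (List Bool)) (s : Int) :
    runB m rows cols ((ci, cj, k + 4) :: rest) v s = runB m rows cols rest v s := by
  rw [runB]

theorem runB_step0_pos (m : List (List Int)) (rows cols : Int) (ci cj : Int)
    (rest : List (Int × Int × Nat)) (v : List (List Bool)) (s : Int)
    (h : 0 < ci ∧ pvMval m (ci-1) cj <= s ∧ pvGet2 v (ci-1) cj = some false) :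
    runB m rows cols ((ci, cj, 0) :: rest) v s =
      runB m rows cols (((ci-1), cj, 0) :: (ci, cj, 1) :: rest) (pvSet2 v (ci-1) cj) (s + pvMval m (ci-1) cj) := by
  conv_lhs => rw [runB]
  exact dif_pos h

theorem runB_step0_neg (m : List (List Int)) (rows cols : Int) (ci cj : Int)
    (rest : List (Int × Int × Nat)) (v : List (List Bool)) (s : Int)
    (h : ¬ (0 < ci ∧ pvMval m (ci-1) cj <= s ∧ pvGet2 v (ci-1) cj = some false)) :
    runB m rows cols ((ci, cj, 0) :: rest) v s = runB m rows cols ((ci, cj, 1) :: rest) v s := by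
  conv_lhs => rw [runB]
  exact dif_neg h

theorem runB_step1_pos (m : List (List Int)) (rows cols : Int) (ci cj : Int)
    (rest : List (Int × Int × Nat)) (v : List (List Bool)) (s : Int)
    (h : ci < rows - 1 ∧ pvMval m (ci+1) cj <= s ∧ pvGet2 v (ci+1) cj = some false) :
    runB m rows cols ((ci, cj, 1) :: rest) v s =
      runB m rows cols (((ci+1), cj, 0) :: (ci, cj, 2) :: rest) (pvSet2 v (ci+1) cj) (s + pvMval m (ci+1) cj) := by
  conv_lhs => rw [runB]
  exact dif_pos h

theorem runB_step1_neg (m : List (List Int)) (rows cols : Int) (ci cj : Int)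
    (rest : List (Int × Int × Nat)) (v : List (List Bool)) (s : Int)
    (h : ¬ (ci < rows - 1 ∧ pvMval m (ci+1) cj <= s ∧ pvGet2 v (ci+1) cj = some false)) :
    runB m rows cols ((ci, cj, 1) :: rest) v s = runB m rows cols ((ci, cj, 2) :: rest) v s := by
  conv_lhs => rw [runB]
  exact dif_neg h

theorem runB_step2_pos (m : List (List Int)) (rows cols : Int) (ci cj : Int)
    (rest : List (Int × Int × Nat)) (v : List (List Bool)) (s : Int)
    (h : cj < cols - 1 ∧ pvMval m ci (cj+1) <= s ∧ pvGet2 v ci (cj+1) = some false) :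
    runB m rows cols ((ci, cj, 2) :: rest) v s =
      runB m rows cols ((ci, (cj+1), 0) :: (ci, cj, 3) :: rest) (pvSet2 v ci (cj+1)) (s + pvMval m ci (cj+1)) := by
  conv_lhs => rw [runB]
  exact dif_pos h

theorem runB_step2_neg (m : List (List Int)) (rows cols : Int) (ci cj : Int)
    (rest : List (Int × Int × Nat)) (v : List (List Bool)) (s : Int)
    (h : ¬ (cj < cols - 1 ∧ pvMval m ci (cj+1) <= s ∧ pvGet2 v ci (cj+1) = some false)) :
    runB m rows cols ((ci, cj, 2) :: rest) v s = runB m rows cols ((ci, cj, 3) :: rest) v s := by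
  conv_lhs => rw [runB]
  exact dif_neg h

theorem runB_step3_pos (m : List (List Int)) (rows cols : Int) (ci cj : Int)
    (rest : List (Int × Int × Nat)) (v : List (List Bool)) (s : Int)
    (h : 0 < cj ∧ pvMval m ci (cj-1) <= s ∧ pvGet2 v ci (cj-1) = some false) :
    runB m rows cols ((ci, cj, 3) :: rest) v s =
      runB m rows cols ((ci, (cj-1), 0) :: (ci, cj, 4) :: rest) (pvSet2 v ci (cj-1)) (s + pvMval m ci (cj-1)) := by
  conv_lhs => rw [runB]
  exact dif_pos h

theorem runB_step3_neg (m : List (List Int)) (rows cols : Int) (ci cj : Int)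
    (rest : List (Int × Int × Nat)) (v : List (List Bool)) (s : Int)
    (h : ¬ (0 < cj ∧ pvMval m ci (cj-1) <= s ∧ pvGet2 v ci (cj-1) = some false)) :
    runB m rows cols ((ci, cj, 3) :: rest) v s = runB m rows cols ((ci, cj, 4) :: rest) v s := by
  conv_lhs => rw [runB]
  exact dif_neg h

theorem dfsA_cf_le (m : List (List Int)) : ∀ (fuel : Nat) (h : Int) (v : List (List Bool)) (s i j : Int),
    pvCF (dfsA m fuel h v s i j).1 <= pvCF v := by
  intro fuel
  induction fuel with
  | zero => intro h v s i j; simp [dfsA]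
  | succ fuel ih =>
    intro h v s i j
    have step : ∀ (c : Prop) (inst : Decidable c) (h' i' j' : Int) (p : List (List Bool) × Int),
        pvCF ((@ite _ c inst (dfsA m fuel h' p.1 p.2 i' j') p)).1 <= pvCF p.1 := by
      intro c inst h' i' j' p
      rcases inst with hc | hc
      · simp [hc]
      · simpa [hc] using ih h' p.1 p.2 i' j'
    simp only [dfsA]
    exact le_trans (step _ _ _ _ _ _) (le_trans (step _ _ _ _ _ _) (le_trans (step _ _ _ _ _ _)
      (le_trans (step _ _ _ _ _ _) (pvCF_pvSet2_le v i j))))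


theorem pvCF_pos_of_false (v : List (List Bool)) (i j : Int) (h : pvGet2 v i j = some false) :
    0 < pvCF v := by
  unfold pvGet2 at h
  rcases hgi : PySem.List.pyGet? v i with _ | row
  · simp [hgi] at h
  · rw [hgi] at h
    simp only [Option.bind_some] at h
    have hrow := PySem.List.mem_of_pyGet?_eq_some _ hgi
    have hf := PySem.List.mem_of_pyGet?_eq_some _ h
    unfold pvCF
    exact List.count_pos_iff.mpr (List.mem_flatten.mpr ⟨row, hrow, hf⟩)

theorem pv_stage (m : List (List Int)) (fuel : Nat)
    (hih : ∀ (v : List (List Bool)) (s h i j : Int) (rest : List (Int × Int × Nat)),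
      2 * pvCF v + (if pvGet2 v i j = some false then 1 else 2) <= fuel + 1 →
      runB m (pvRows m) (pvCols m) ((i, j, 0) :: rest) (pvSet2 v i j) (s + h)
        = runB m (pvRows m) (pvCols m) rest (dfsA m fuel h v s i j).1 (dfsA m fuel h v s i j).2)
    (ci cj ni nj : Int) (k k1 : Nat) (c : Prop) [inst : Decidable c]
    (rest : List (Int × Int × Nat))
    (hpos : ∀ (v : List (List Bool)) (s : Int), (c ∧ pvMval m ni nj <= s ∧ pvGet2 v ni nj = some false) →
      runB m (pvRows m) (pvCols m) ((ci, cj, k) :: rest) v s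
        = runB m (pvRows m) (pvCols m) ((ni, nj, 0) :: (ci, cj, k1) :: rest) (pvSet2 v ni nj) (s + pvMval m ni nj))
    (hneg : ∀ (v : List (List Bool)) (s : Int), ¬ (c ∧ pvMval m ni nj <= s ∧ pvGet2 v ni nj = some false) →
      runB m (pvRows m) (pvCols m) ((ci, cj, k) :: rest) v s = runB m (pvRows m) (pvCols m) ((ci, cj, k1) :: rest) v s)
    (p : List (List Bool) × Int) (hcf : 2 * pvCF p.1 <= fuel) :
    runB m (pvRows m) (pvCols m) ((ci, cj, k) :: rest) p.1 p.2
      = runB m (pvRows m) (pvCols m) ((ci, cj, k1) :: rest)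
          (if c ∧ pvMval m ni nj <= p.2 ∧ pvGet2 p.1 ni nj = some false then
            dfsA m fuel (pvMval m ni nj) p.1 p.2 ni nj else p).1
          (if c ∧ pvMval m ni nj <= p.2 ∧ pvGet2 p.1 ni nj = some false then
            dfsA m fuel (pvMval m ni nj) p.1 p.2 ni nj else p).2 := by
  by_cases hg : c ∧ pvMval m ni nj <= p.2 ∧ pvGet2 p.1 ni nj = some false
  · rw [hpos p.1 p.2 hg]
    have hbound : 2 * pvCF p.1 + (if pvGet2 p.1 ni nj = some false then 1 else 2) <= fuel + 1 := by
      rw [if_pos hg.2.2]; omega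
    rw [if_pos hg]
    exact hih p.1 p.2 (pvMval m ni nj) ni nj ((ci, cj, k1) :: rest) hbound
  · rw [hneg p.1 p.2 hg, if_neg hg]

theorem main_lemma (m : List (List Int)) :
    ∀ (fuel : Nat) (v : List (List Bool)) (s h i j : Int) (rest : List (Int × Int × Nat)),
      2 * pvCF v + (if pvGet2 v i j = some false then 1 else 2) <= fuel + 1 →
      runB m (pvRows m) (pvCols m) ((i, j, 0) :: rest) (pvSet2 v i j) (s + h)
        = runB m (pvRows m) (pvCols m) rest (dfsA m fuel h v s i j).1 (dfsA m fuel h v s i j).2 := by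
  intro fuel
  induction fuel with
  | zero =>
    intro v s h i j rest hb
    exfalso
    by_cases hp : pvGet2 v i j = some false
    · have := pvCF_pos_of_false v i j hp
      rw [if_pos hp] at hb
      omega
    · rw [if_neg hp] at hb
      omega
  | succ fuel ih =>
    intro v s h i j rest hb
    have hcf0 : 2 * pvCF (pvSet2 v i j) <= fuel := by
      by_cases hp : pvGet2 v i j = some false
      · have h1 := pvCF_pvSet2_lt v i j hp
        rw [if_pos hp] at hb
        omega
      · have h1 := pvCF_pvSet2_le v i j
        rw [if_neg hp] at hb
        omega
    set Q1 := (if 0 < i ∧ pvMval m (i-1) j <= (s + h) ∧ pvGet2 (pvSet2 v i j) (i-1) j = some false then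
      dfsA m fuel (pvMval m (i-1) j) (pvSet2 v i j) (s + h) (i-1) j else (pvSet2 v i j, s + h)) with hQ1
    have hq1 : pvCF Q1.1 <= pvCF (pvSet2 v i j) := by
      rw [hQ1]; split
      · exact dfsA_cf_le m fuel _ _ _ _ _
      · exact le_rfl
    set Q2 := (if i < pvRows m - 1 ∧ pvMval m (i+1) j <= Q1.2 ∧ pvGet2 Q1.1 (i+1) j = some false then
      dfsA m fuel (pvMval m (i+1) j) Q1.1 Q1.2 (i+1) j else Q1) with hQ2
    have hq2 : pvCF Q2.1 <= pvCF (pvSet2 v i j) := by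
      rw [hQ2]; split
      · exact le_trans (dfsA_cf_le m fuel _ _ _ _ _) hq1
      · exact hq1
    set Q3 := (if j < pvCols m - 1 ∧ pvMval m i (j+1) <= Q2.2 ∧ pvGet2 Q2.1 i (j+1) = some false then
      dfsA m fuel (pvMval m i (j+1)) Q2.1 Q2.2 i (j+1) else Q2) with hQ3
    have hq3 : pvCF Q3.1 <= pvCF (pvSet2 v i j) := by
      rw [hQ3]; split
      · exact le_trans (dfsA_cf_le m fuel _ _ _ _ _) hq2
      · exact hq2
    set Q4 := (if 0 < j ∧ pvMval m i (j-1) <= Q3.2 ∧ pvGet2 Q3.1 i (j-1) = some false then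
      dfsA m fuel (pvMval m i (j-1)) Q3.1 Q3.2 i (j-1) else Q3) with hQ4
    have e0 : runB m (pvRows m) (pvCols m) ((i, j, 0) :: rest) (pvSet2 v i j) (s + h)
        = runB m (pvRows m) (pvCols m) ((i, j, 1) :: rest) Q1.1 Q1.2 := by
      rw [hQ1]
      exact pv_stage m fuel ih i j (i-1) j 0 1 (0 < i) rest
        (fun v' s' hg => runB_step0_pos m (pvRows m) (pvCols m) i j rest v' s' hg)
        (fun v' s' hg => runB_step0_neg m (pvRows m) (pvCols m) i j rest v' s' hg)
        (pvSet2 v i j, s + h) hcf0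
    have e1 : runB m (pvRows m) (pvCols m) ((i, j, 1) :: rest) Q1.1 Q1.2
        = runB m (pvRows m) (pvCols m) ((i, j, 2) :: rest) Q2.1 Q2.2 := by
      rw [hQ2]
      exact pv_stage m fuel ih i j (i+1) j 1 2 (i < pvRows m - 1) rest
        (fun v' s' hg => runB_step1_pos m (pvRows m) (pvCols m) i j rest v' s' hg)
        (fun v' s' hg => runB_step1_neg m (pvRows m) (pvCols m) i j rest v' s' hg)
        Q1 (by omega)
    have e2 : runB m (pvRows m) (pvCols m) ((i, j, 2) :: rest) Q2.1 Q2.2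
        = runB m (pvRows m) (pvCols m) ((i, j, 3) :: rest) Q3.1 Q3.2 := by
      rw [hQ3]
      exact pv_stage m fuel ih i j i (j+1) 2 3 (j < pvCols m - 1) rest
        (fun v' s' hg => runB_step2_pos m (pvRows m) (pvCols m) i j rest v' s' hg)
        (fun v' s' hg => runB_step2_neg m (pvRows m) (pvCols m) i j rest v' s' hg)
        Q2 (by omega)
    have e3 : runB m (pvRows m) (pvCols m) ((i, j, 3) :: rest) Q3.1 Q3.2
        = runB m (pvRows m) (pvCols m) ((i, j, 4) :: rest) Q4.1 Q4.2 := by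
      rw [hQ4]
      exact pv_stage m fuel ih i j i (j-1) 3 4 (0 < j) rest
        (fun v' s' hg => runB_step3_pos m (pvRows m) (pvCols m) i j rest v' s' hg)
        (fun v' s' hg => runB_step3_neg m (pvRows m) (pvCols m) i j rest v' s' hg)
        Q3 (by omega)
    have e4 : runB m (pvRows m) (pvCols m) ((i, j, 4) :: rest) Q4.1 Q4.2
        = runB m (pvRows m) (pvCols m) rest Q4.1 Q4.2 := runB_pop m (pvRows m) (pvCols m) i j 0 rest Q4.1 Q4.2
    have hD : dfsA m (fuel + 1) h v s i j = Q4 := by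
      rw [hQ4, hQ3, hQ2, hQ1]
      simp only [dfsA]
    rw [hD]
    exact e0.trans (e1.trans (e2.trans (e3.trans e4)))

-- ===== VERDICT (by name: the statement is the Claim_ definition above) =====
theorem dfs_spec : Claim_equal_dfs := by
  unfold Claim_equal_dfs Spec_dfs
  intro heroi matriz visto soma i j hdom hpre
  show (dfsA matriz (2 * pvCF visto + 2) heroi visto soma i j).2
      = (runB matriz (pvRows matriz) (pvCols matriz) [(i, j, 0)] (pvSet2 visto i j) (soma + heroi)).2
  have hmeas : 2 * pvCF visto + (if pvGet2 visto i j = some false then 1 else 2)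
      <= (2 * pvCF visto + 2) + 1 := by split <;> omega
  have hmain := main_lemma matriz (2 * pvCF visto + 2) visto soma heroi i j [] hmeas
  rw [hmain, runB_nil]
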